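-- pv_equiv track=rewrite | github.com/vineethkumarrao/useless | python-backend/enhanced_github_tools.py | _get_quality_suggestions
-- ===== SOURCE A (Python) =====
-- from typing import Dict, List, Optional, Any, Union
--
-- def _get_quality_suggestions(file_path: str, issues: List[str]) -> List[str]:
--     """Get quality improvement suggestions"""
--     suggestions = []
--
--     if any("long lines" in issue.lower() for issue in issues):
--         suggestions.append("Consider breaking long lines for better readability")
--
--     if any("todo" in issue.lower() for issue in issues):
--         suggestions.append("Address TODO/FIXME comments before production")
--
--     if any("large file" in issue.lower() for issue in issues):
--         suggestions.append("Refactor large files into smaller, focused modules")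
--
--     if any("duplication" in issue.lower() for issue in issues):
--         suggestions.append("Extract common code into reusable functions or modules")
--
--     suggestions.extend([
--         "Add comprehensive comments and documentation",
--         "Implement unit tests for critical functionality",
--         "Use linting tools for consistent code style"
--     ])
--
--     return suggestions
-- ===== SOURCE B (Python) =====
-- # All 16 possible suggestion lists are precomputed once, indexed by a 4-bit keyword
-- # bitmask; each call just folds the issues into a mask and looks the answer up.
-- _KEYWORDS = ["long lines", "todo", "large file", "duplication"]
--
-- _MESSAGES = [
--     "Consider breaking long lines for better readability",
--     "Address TODO/FIXME comments before production",
--     "Refactor large files into smaller, focused modules",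
--     "Extract common code into reusable functions or modules",
-- ]
--
-- _ALWAYS = [
--     "Add comprehensive comments and documentation",
--     "Implement unit tests for critical functionality",
--     "Use linting tools for consistent code style",
-- ]
--
-- _OUTPUTS = []
-- for _mask in range(16):
--     _row = []
--     _bit = 1
--     for _msg in _MESSAGES:
--         if _mask & _bit != 0:
--             _row.append(_msg)
--         _bit *= 2
--     _OUTPUTS.append(_row + _ALWAYS)
--
--
-- def _get_quality_suggestions(file_path, issues):
--     mask = 0
--     for issue in issues:
--         low = issue.lower()
--         bit = 1
--         for kw in _KEYWORDS:
--             if kw in low: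
--                 mask |= bit
--             bit *= 2
--     return _OUTPUTS[mask]
-- ===== Notes on version B (the rewrite author's own statement) =====
-- stated objective: alternative
-- what changed: B precomputes a 16-entry table holding every possible suggestion list indexed by a 4-bit keyword bitmask, then each call only folds the issues once into a mask (OR-ing a bit per keyword found) and returns the precomputed table entry, instead of A's four any()-scans that build the list per call.
import Mathlib
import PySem

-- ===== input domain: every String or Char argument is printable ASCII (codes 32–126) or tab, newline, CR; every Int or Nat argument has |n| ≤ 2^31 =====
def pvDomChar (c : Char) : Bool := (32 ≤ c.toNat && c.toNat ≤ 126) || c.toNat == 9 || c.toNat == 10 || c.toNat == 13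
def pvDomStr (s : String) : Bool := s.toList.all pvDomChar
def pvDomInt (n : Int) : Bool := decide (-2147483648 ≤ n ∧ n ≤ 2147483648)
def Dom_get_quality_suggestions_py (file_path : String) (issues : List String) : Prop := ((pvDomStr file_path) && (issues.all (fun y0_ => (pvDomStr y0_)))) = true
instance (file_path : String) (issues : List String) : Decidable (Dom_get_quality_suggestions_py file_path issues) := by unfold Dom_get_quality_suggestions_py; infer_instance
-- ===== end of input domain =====

-- B precomputes a 16-entry table of all possible suggestion lists indexed by a 4-bit keyword
-- bitmask and each call folds the issues once into a mask, then looks the answer up (objective: alternative).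


-- ===== PORT A =====
def get_quality_suggestions_py (file_path : String) (issues : List String) : List String :=
  let suggestions : List String := []
  let suggestions := if issues.any (fun issue => PySem.Str.isIn "long lines" (PySem.Str.lower issue)) then suggestions ++ ["Consider breaking long lines for better readability"] else suggestions
  let suggestions := if issues.any (fun issue => PySem.Str.isIn "todo" (PySem.Str.lower issue)) then suggestions ++ ["Address TODO/FIXME comments before production"] else suggestions
  let suggestions := if issues.any (fun issue => PySem.Str.isIn "large file" (PySem.Str.lower issue)) then suggestions ++ ["Refactor large files into smaller, focused modules"] else suggestions
  let suggestions := if issues.any (fun issue => PySem.Str.isIn "duplication" (PySem.Str.lower issue)) then suggestions ++ ["Extract common code into reusable functions or modules"] else suggestions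
  suggestions ++ ["Add comprehensive comments and documentation", "Implement unit tests for critical functionality", "Use linting tools for consistent code style"]

-- ===== PORT B =====
def qsKeywords : List String := ["long lines", "todo", "large file", "duplication"]

def qsMessages : List String := [
  "Consider breaking long lines for better readability",
  "Address TODO/FIXME comments before production",
  "Refactor large files into smaller, focused modules",
  "Extract common code into reusable functions or modules"]

def qsAlways : List String := [
  "Add comprehensive comments and documentation",
  "Implement unit tests for critical functionality",
  "Use linting tools for consistent code style"]

-- the module-level precomputation: _OUTPUTS[mask] for every mask in range(16)
-- (masks and bits are nonnegative Python ints throughout, ported as Nat)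
def qsOutputs : List (List String) :=
  (List.range 16).foldl (fun outs mask =>
    outs ++ [(qsMessages.foldl (fun (st : List String × Nat) msg =>
        (if mask &&& st.2 ≠ 0 then st.1 ++ [msg] else st.1, st.2 * 2)) ([], 1)).1 ++ qsAlways]) []

-- the body of B's outer loop: fold one issue's keywords into the mask
def qsMark (mask : Nat) (issue : String) : Nat :=
  let low := PySem.Str.lower issue
  (qsKeywords.foldl (fun (st : Nat × Nat) kw =>
      (if PySem.Str.isIn kw low then st.1 ||| st.2 else st.1, st.2 * 2)) (mask, 1)).1

def get_quality_suggestions_py_alt (file_path : String) (issues : List String) : List String :=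
  let mask : Nat := issues.foldl qsMark 0
  (PySem.List.pyGet? qsOutputs (mask : Int)).getD []

-- ===== PRECONDITION & SPEC =====
def Spec_get_quality_suggestions_py (file_path : String) (issues : List String) (out : List String) : Prop := out = get_quality_suggestions_py_alt file_path issues
instance (file_path : String) (issues : List String) (out : List String) : Decidable (Spec_get_quality_suggestions_py file_path issues out) := by unfold Spec_get_quality_suggestions_py; infer_instance

-- ===== CLAIM (what is proved, stated in full; the proofs are below) =====
def Claim_equal_get_quality_suggestions_py : Prop := ∀ (file_path : String) (issues : List String), Dom_get_quality_suggestions_py file_path issues → Spec_get_quality_suggestions_py file_path issues (get_quality_suggestions_py file_path issues)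

-- ===== LEMMAS AND PROOFS =====

-- the bitmask contributed by one issue
def qsFlags (issue : String) : Nat :=
  (if PySem.Str.isIn "long lines" (PySem.Str.lower issue) then 1 else 0) |||
  (if PySem.Str.isIn "todo" (PySem.Str.lower issue) then 2 else 0) |||
  (if PySem.Str.isIn "large file" (PySem.Str.lower issue) then 4 else 0) |||
  (if PySem.Str.isIn "duplication" (PySem.Str.lower issue) then 8 else 0)

-- the bitmask of the whole issue list, spelled with A's four any-scans
def qsAnyFlags (issues : List String) : Nat :=
  (if issues.any (fun issue => PySem.Str.isIn "long lines" (PySem.Str.lower issue)) then 1 else 0) |||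
  (if issues.any (fun issue => PySem.Str.isIn "todo" (PySem.Str.lower issue)) then 2 else 0) |||
  (if issues.any (fun issue => PySem.Str.isIn "large file" (PySem.Str.lower issue)) then 4 else 0) |||
  (if issues.any (fun issue => PySem.Str.isIn "duplication" (PySem.Str.lower issue)) then 8 else 0)

lemma qsMark_eq (mask : Nat) (issue : String) : qsMark mask issue = mask ||| qsFlags issue := by
  unfold qsMark qsFlags qsKeywords
  simp only [List.foldl]
  split_ifs <;> simp [Nat.or_assoc, Nat.or_zero, Nat.zero_or]

set_option maxHeartbeats 2000000 in
lemma qsFlags_lor_anyFlags (x : String) (xs : List String) :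
    qsFlags x ||| qsAnyFlags xs = qsAnyFlags (x :: xs) := by
  unfold qsFlags qsAnyFlags
  simp only [List.any_cons]
  by_cases h1 : PySem.Str.isIn "long lines" (PySem.Str.lower x) = true <;>
  by_cases h2 : PySem.Str.isIn "todo" (PySem.Str.lower x) = true <;>
  by_cases h3 : PySem.Str.isIn "large file" (PySem.Str.lower x) = true <;>
  by_cases h4 : PySem.Str.isIn "duplication" (PySem.Str.lower x) = true <;>
  by_cases g1 : xs.any (fun issue => PySem.Str.isIn "long lines" (PySem.Str.lower issue)) = true <;>
  by_cases g2 : xs.any (fun issue => PySem.Str.isIn "todo" (PySem.Str.lower issue)) = true <;>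
  by_cases g3 : xs.any (fun issue => PySem.Str.isIn "large file" (PySem.Str.lower issue)) = true <;>
  by_cases g4 : xs.any (fun issue => PySem.Str.isIn "duplication" (PySem.Str.lower issue)) = true <;>
  simp only [h1, h2, h3, h4, g1, g2, g3, g4, Bool.true_or, Bool.false_or, if_true,
    Bool.or_self] <;> decide

lemma foldl_qsMark (issues : List String) :
    ∀ mask : Nat, issues.foldl qsMark mask = mask ||| qsAnyFlags issues := by
  induction issues with
  | nil => intro mask; simp [qsAnyFlags]
  | cons x xs ih =>
      intro mask
      simp only [List.foldl]
      rw [qsMark_eq, ih, Nat.or_assoc, qsFlags_lor_anyFlags]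

-- ===== VERDICT (by name: the statement is the Claim_ definition above) =====
theorem get_quality_suggestions_py_spec : Claim_equal_get_quality_suggestions_py := by
  intro file_path issues _
  unfold Spec_get_quality_suggestions_py get_quality_suggestions_py get_quality_suggestions_py_alt
  rw [foldl_qsMark issues 0, Nat.zero_or]
  unfold qsAnyFlags
  by_cases g1 : issues.any (fun issue => PySem.Str.isIn "long lines" (PySem.Str.lower issue)) = true <;>
  by_cases g2 : issues.any (fun issue => PySem.Str.isIn "todo" (PySem.Str.lower issue)) = true <;>
  by_cases g3 : issues.any (fun issue => PySem.Str.isIn "large file" (PySem.Str.lower issue)) = true <;>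
  by_cases g4 : issues.any (fun issue => PySem.Str.isIn "duplication" (PySem.Str.lower issue)) = true <;>
  simp only [g1, g2, g3, g4, if_true] <;> rfl
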